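-- pv_equiv track=rewrite | github.com/eduhaidu/nl2sql | nl2sql-logic/curate_examples.py | add_query_patterns
-- ===== SOURCE A (Python) =====
-- def add_query_patterns(examples):
--     """Categorize examples by SQL pattern for better selection"""
--     patterns = {
--         'basic_select': [],
--         'join': [],
--         'aggregation': [],
--         'subquery': [],
--         'special_chars': [],
--         'complex': []
--     }
--
--     for ex in examples:
--         sql = ex['sql'].upper()
--
--         if 'JOIN' in sql:
--             patterns['join'].append(ex)
--         if any(agg in sql for agg in ['SUM(', 'COUNT(', 'AVG(', 'MAX(', 'MIN(', 'GROUP BY']):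
--             patterns['aggregation'].append(ex)
--         if 'SELECT' in sql and sql.count('SELECT') > 1:
--             patterns['subquery'].append(ex)
--         if any(char in ex['sql'] for char in ['[', '(', ')', '%']):
--             patterns['special_chars'].append(ex)
--         if len(sql.split()) > 20:  # Complex queries
--             patterns['complex'].append(ex)
--         if 'WHERE' in sql and 'JOIN' not in sql and 'GROUP BY' not in sql:
--             patterns['basic_select'].append(ex)
--
--     return patterns
-- ===== SOURCE B (Python) =====
-- def add_query_patterns(examples):
--     """Categorize examples by SQL pattern for better selection"""
--     buckets = [
--         ('basic_select', lambda raw, sql: 'WHERE' in sql and 'JOIN' not in sql and 'GROUP BY' not in sql),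
--         ('join', lambda raw, sql: 'JOIN' in sql),
--         ('aggregation', lambda raw, sql: any(a in sql for a in ('SUM(', 'COUNT(', 'AVG(', 'MAX(', 'MIN(', 'GROUP BY'))),
--         ('subquery', lambda raw, sql: 'SELECT' in sql and sql.count('SELECT') > 1),
--         ('special_chars', lambda raw, sql: any(c in raw for c in '[()%')),
--         ('complex', lambda raw, sql: len(sql.split()) > 20),
--     ]
--     return {name: [ex for ex in examples if pred(ex['sql'], ex['sql'].upper())]
--             for name, pred in buckets}
-- ===== Notes on version B (the rewrite author's own statement) =====
-- stated objective: alternative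
-- what changed: Replaces A's single loop that mutates six bucket lists with a declarative (name, predicate) table and one filter pass per bucket assembled into the result dict.
import Mathlib
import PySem

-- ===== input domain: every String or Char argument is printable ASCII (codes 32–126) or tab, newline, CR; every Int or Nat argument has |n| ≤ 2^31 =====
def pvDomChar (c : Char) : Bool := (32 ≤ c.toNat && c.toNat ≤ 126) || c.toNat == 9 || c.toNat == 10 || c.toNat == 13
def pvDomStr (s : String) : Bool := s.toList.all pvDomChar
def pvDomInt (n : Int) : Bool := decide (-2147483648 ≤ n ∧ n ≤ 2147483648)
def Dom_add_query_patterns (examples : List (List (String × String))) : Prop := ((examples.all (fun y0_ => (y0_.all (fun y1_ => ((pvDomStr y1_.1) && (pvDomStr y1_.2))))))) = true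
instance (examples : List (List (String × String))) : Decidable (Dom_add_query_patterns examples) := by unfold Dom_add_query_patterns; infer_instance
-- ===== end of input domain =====

-- B replaces A's single mutating loop with a (name, predicate) table and one filter per bucket: alternative decomposition, same cost.

-- ex['sql'] : first-match lookup in the association list (total form; Pre_ guarantees the key is present)
def pvSqlOf (ex : List (String × String)) : String := ((PySem.Dict.mk ex).get? "sql").getD ""

def pvStateT := List (List (String × String)) × List (List (String × String)) × List (List (String × String)) × List (List (String × String)) × List (List (String × String)) × List (List (String × String))

-- the body of A's for-loop
def pvStepA (st : pvStateT) (ex : List (String × String)) : pvStateT :=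
  let (bs, js, ag, sb, sc, cx) := st
  let sql := PySem.Str.upper (pvSqlOf ex)
  let js := if PySem.Str.isIn "JOIN" sql then js ++ [ex] else js
  let ag := if ["SUM(", "COUNT(", "AVG(", "MAX(", "MIN(", "GROUP BY"].any (fun agg => PySem.Str.isIn agg sql) then ag ++ [ex] else ag
  let sb := if PySem.Str.isIn "SELECT" sql && decide (1 < PySem.Str.count sql "SELECT") then sb ++ [ex] else sb
  let sc := if ["[", "(", ")", "%"].any (fun ch => PySem.Str.isIn ch (pvSqlOf ex)) then sc ++ [ex] else sc
  let cx := if decide (20 < (PySem.Str.split₀ sql).length) then cx ++ [ex] else cx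
  let bs := if PySem.Str.isIn "WHERE" sql && !PySem.Str.isIn "JOIN" sql && !PySem.Str.isIn "GROUP BY" sql then bs ++ [ex] else bs
  (bs, js, ag, sb, sc, cx)

-- ===== PORT A =====
def add_query_patterns (examples : List (List (String × String))) : List (String × List (List (String × String))) :=
  let st := examples.foldl pvStepA ([], [], [], [], [], [])
  [("basic_select", st.1), ("join", st.2.1), ("aggregation", st.2.2.1),
   ("subquery", st.2.2.2.1), ("special_chars", st.2.2.2.2.1), ("complex", st.2.2.2.2.2)]

-- ===== PORT B =====
-- the (bucket name, predicate raw-sql upper-sql) table of Source B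
def pvBuckets : List (String × (String → String → Bool)) :=
  [("basic_select", fun _raw sql => PySem.Str.isIn "WHERE" sql && !PySem.Str.isIn "JOIN" sql && !PySem.Str.isIn "GROUP BY" sql),
   ("join", fun _raw sql => PySem.Str.isIn "JOIN" sql),
   ("aggregation", fun _raw sql => ["SUM(", "COUNT(", "AVG(", "MAX(", "MIN(", "GROUP BY"].any (fun agg => PySem.Str.isIn agg sql)),
   ("subquery", fun _raw sql => PySem.Str.isIn "SELECT" sql && decide (1 < PySem.Str.count sql "SELECT")),
   ("special_chars", fun raw _sql => ["[", "(", ")", "%"].any (fun ch => PySem.Str.isIn ch raw)),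
   ("complex", fun _raw sql => decide (20 < (PySem.Str.split₀ sql).length))]

def add_query_patterns_alt (examples : List (List (String × String))) : List (String × List (List (String × String))) :=
  pvBuckets.map (fun np => (np.1, examples.filter (fun ex => np.2 (pvSqlOf ex) (PySem.Str.upper (pvSqlOf ex)))))

-- ===== PRECONDITION & SPEC =====
-- Pre_ excludes exactly the inputs where some example lacks the 'sql' key, on which Python A raises KeyError.
def Pre_add_query_patterns (examples : List (List (String × String))) : Prop :=
  ∀ ex ∈ examples, "sql" ∈ ex.map Prod.fst
instance (examples : List (List (String × String))) : Decidable (Pre_add_query_patterns examples) := by unfold Pre_add_query_patterns; infer_instance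

def pvWitness_add_query_patterns : (List (List (String × String))) :=
  [[("sql", "SELECT a FROM t WHERE b = 1")], [("sql", "SELECT * FROM x JOIN y")]]

def Spec_add_query_patterns (examples : List (List (String × String))) (out : List (String × List (List (String × String)))) : Prop := out = add_query_patterns_alt examples
instance (examples : List (List (String × String))) (out : List (String × List (List (String × String)))) : Decidable (Spec_add_query_patterns examples out) := by unfold Spec_add_query_patterns; infer_instance

-- ===== CLAIM (what is proved, stated in full; the proofs are below) =====
def Claim_equal_add_query_patterns : Prop := ∀ (examples : List (List (String × String))), Dom_add_query_patterns examples → Pre_add_query_patterns examples → Spec_add_query_patterns examples (add_query_patterns examples)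

-- ===== LEMMAS AND PROOFS =====

-- A's loop, started from arbitrary accumulators, appends the six filters of the remaining examples.
theorem pv_if_append {α : Type} (c : Bool) (l f : List α) (x : α) :
    (if c then l ++ [x] else l) ++ f = l ++ (if c then x :: f else f) := by
  cases c <;> simp

-- A's loop, started from arbitrary accumulators, appends the six filters of the remaining examples.
theorem pv_foldl_inv (examples : List (List (String × String)))
    (bs js ag sb sc cx : List (List (String × String))) :
    examples.foldl pvStepA (bs, js, ag, sb, sc, cx)
    = (bs ++ examples.filter (fun ex => PySem.Str.isIn "WHERE" (PySem.Str.upper (pvSqlOf ex)) && !PySem.Str.isIn "JOIN" (PySem.Str.upper (pvSqlOf ex)) && !PySem.Str.isIn "GROUP BY" (PySem.Str.upper (pvSqlOf ex))),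
       js ++ examples.filter (fun ex => PySem.Str.isIn "JOIN" (PySem.Str.upper (pvSqlOf ex))),
       ag ++ examples.filter (fun ex => ["SUM(", "COUNT(", "AVG(", "MAX(", "MIN(", "GROUP BY"].any (fun agg => PySem.Str.isIn agg (PySem.Str.upper (pvSqlOf ex)))),
       sb ++ examples.filter (fun ex => PySem.Str.isIn "SELECT" (PySem.Str.upper (pvSqlOf ex)) && decide (1 < PySem.Str.count (PySem.Str.upper (pvSqlOf ex)) "SELECT")),
       sc ++ examples.filter (fun ex => ["[", "(", ")", "%"].any (fun ch => PySem.Str.isIn ch (pvSqlOf ex))),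
       cx ++ examples.filter (fun ex => decide (20 < (PySem.Str.split₀ (PySem.Str.upper (pvSqlOf ex))).length))) := by
  induction examples generalizing bs js ag sb sc cx with
  | nil => simp
  | cons x xs ih =>
    simp only [List.foldl_cons, pvStepA]
    rw [ih]
    simp only [List.filter_cons, pv_if_append]

-- ===== VERDICT (by name: the statement is the Claim_ definition above) =====
theorem add_query_patterns_spec : Claim_equal_add_query_patterns := by
  intro examples _ _
  unfold Spec_add_query_patterns add_query_patterns add_query_patterns_alt pvBuckets
  rw [pv_foldl_inv]
  simp
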